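-- pv_equiv track=rewrite | github.com/pypi-data/pypi-mirror-392 | packages/word-reaper/word_reaper-2.0.0-py3-none-any.whl/word_reaper/utils/rule_generator.py | expand_mask_incrementally
-- ===== SOURCE A (Python) =====
-- def expand_mask_incrementally(mask, max_length=None):
--     """
--     Expand a mask incrementally (similar to Hashcat's --increment flag).
--
--     Args:
--         mask: Hashcat-style mask
--         max_length: Maximum length to expand to
--
--     Returns:
--         List of masks with increasing lengths
--     """
--     if not mask:
--         return []
--
--     # Parse mask into individual charset sequences
--     charset_seqs = []
--     i = 0
--     while i < len(mask):
--         if i + 1 < len(mask) and mask[i] == '?' and mask[i+1] in 'dlusaDbLUSA':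
--             charset_seqs.append(mask[i:i+2])
--             i += 2
--         else:
--             charset_seqs.append(mask[i])
--             i += 1
--
--     # Get maximum length if not specified
--     if max_length is None:
--         max_length = len(charset_seqs)
--     else:
--         max_length = min(max_length, len(charset_seqs))
--
--     # Generate masks with increasing lengths
--     masks = []
--     for length in range(1, max_length + 1):
--         masks.append(''.join(charset_seqs[:length]))
--
--     return masks
-- ===== SOURCE B (Python) =====
-- def expand_mask_incrementally(mask, max_length=None):
--     CLASSES = 'dlusaDbLUSA'
--     # single pass with a "pending '?'" flag instead of index arithmetic
--     tokens = []
--     pending = False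
--     for ch in mask:
--         if pending:
--             pending = False
--             if ch in CLASSES:
--                 tokens.append('?' + ch)
--                 continue
--             tokens.append('?')
--         if ch == '?':
--             pending = True
--         else:
--             tokens.append(ch)
--     if pending:
--         tokens.append('?')
--     n = len(tokens) if max_length is None else max(0, min(max_length, len(tokens)))
--     # running prefix instead of re-slicing and re-joining per length
--     out = []
--     prefix = ''
--     for tok in tokens[:n]:
--         prefix += tok
--         out.append(prefix)
--     return out
-- ===== Notes on version B (the rewrite author's own statement) =====
-- stated objective: alternative
-- what changed: Tokenization is done in a single pass with a pending-'?' flag instead of index arithmetic with lookahead, and the increasing masks are emitted by maintaining a running prefix string instead of re-slicing and re-joining the token list for every length.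
import Mathlib
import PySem

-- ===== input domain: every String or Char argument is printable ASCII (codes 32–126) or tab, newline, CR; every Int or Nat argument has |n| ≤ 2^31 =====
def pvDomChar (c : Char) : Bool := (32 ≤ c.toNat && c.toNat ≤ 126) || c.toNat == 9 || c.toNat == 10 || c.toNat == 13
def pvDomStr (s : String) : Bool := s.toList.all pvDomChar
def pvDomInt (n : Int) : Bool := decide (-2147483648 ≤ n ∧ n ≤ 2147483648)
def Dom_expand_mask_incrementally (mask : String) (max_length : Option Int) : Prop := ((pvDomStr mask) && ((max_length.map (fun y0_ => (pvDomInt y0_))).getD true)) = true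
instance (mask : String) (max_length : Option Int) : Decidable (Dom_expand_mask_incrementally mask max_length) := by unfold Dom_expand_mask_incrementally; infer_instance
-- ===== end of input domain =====

-- B tokenizes in one pass with a pending-'?' flag and emits the increasing masks from a
-- running prefix instead of A's index/lookahead loop and per-length re-slice-and-join
-- (alternative decomposition; same exact output).
-- Strings are modelled as List Char (PySem.Chars); tokens are char lists, turned into
-- String with String.ofList at emission time (exact: Python str concat = list append).

-- the hashcat charset-class letters, 'dlusaDbLUSA' (shared literal constant)
def pvCLS : List Char := "dlusaDbLUSA".toList

-- ===== PORT A =====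
-- A's while loop over index i with lookahead mask[i+1], as structural recursion on the
-- remaining characters (i < len / i+1 < len become the list patterns).
def pvTokA : List Char → List (List Char)
  | [] => []
  | [c] => [[c]]
  | c :: c2 :: rest =>
    if c = '?' ∧ c2 ∈ pvCLS then [c, c2] :: pvTokA rest
    else [c] :: pvTokA (c2 :: rest)

def expand_mask_incrementally (mask : String) (max_length : Option Int) : List String :=
  if mask.toList = [] then []
  else
    let charset_seqs := pvTokA mask.toList
    let maxL : Int :=
      match max_length with
      | none => (charset_seqs.length : Int)
      | some m => min m (charset_seqs.length : Int)
    (PySem.List.pyRange 1 (maxL + 1) 1).foldl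
      (fun masks length =>
        masks ++ [String.ofList (PySem.Chars.join [] (PySem.List.slice charset_seqs none (some length)))])
      []

-- ===== PORT B =====
-- Source B's for-loop with the pending flag, as structural recursion on the characters
-- (state = the flag; the trailing 'if pending' is the [] case).
def pvTokB : Bool → List Char → List (List Char)
  | pending, [] => if pending then [['?']] else []
  | pending, ch :: rest =>
    if pending then
      if ch ∈ pvCLS then ['?', ch] :: pvTokB false rest
      else ['?'] :: (if ch = '?' then pvTokB true rest else [ch] :: pvTokB false rest)
    else
      if ch = '?' then pvTokB true rest else [ch] :: pvTokB false rest

def expand_mask_incrementally_alt (mask : String) (max_length : Option Int) : List String :=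
  let tokens := pvTokB false mask.toList
  let n : Int :=
    match max_length with
    | none => (tokens.length : Int)
    | some m => max 0 (min m (tokens.length : Int))
  -- running prefix over tokens[:n]
  ((PySem.List.slice tokens none (some n)).foldl
      (fun (st : List Char × List String) tok =>
        (st.1 ++ tok, st.2 ++ [String.ofList (st.1 ++ tok)]))
      ([], [])).2

-- ===== PRECONDITION & SPEC =====
def Spec_expand_mask_incrementally (mask : String) (max_length : Option Int) (out : List String) : Prop := out = expand_mask_incrementally_alt mask max_length
instance (mask : String) (max_length : Option Int) (out : List String) : Decidable (Spec_expand_mask_incrementally mask max_length out) := by unfold Spec_expand_mask_incrementally; infer_instance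

-- ===== CLAIM (what is proved, stated in full; the proofs are below) =====
def Claim_equal_expand_mask_incrementally : Prop := ∀ (mask : String) (max_length : Option Int), Dom_expand_mask_incrementally mask max_length → Spec_expand_mask_incrementally mask max_length (expand_mask_incrementally mask max_length)

-- ===== LEMMAS AND PROOFS =====

-- the two tokenizers agree (flag 'true' = a '?' has just been consumed)
theorem pvTok_both (cs : List Char) :
    pvTokB false cs = pvTokA cs ∧ pvTokB true cs = pvTokA ('?' :: cs) := by
  induction cs with
  | nil => exact ⟨rfl, rfl⟩
  | cons ch rest ih =>
    have h1 : pvTokB false (ch :: rest) = pvTokA (ch :: rest) := by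
      cases rest with
      | nil =>
        by_cases h : ch = '?' <;> simp [pvTokB, pvTokA, h]
      | cons c2 r2 =>
        by_cases h : ch = '?'
        · subst h
          simpa [pvTokB] using ih.2
        · simp [pvTokB, pvTokA, h]
          exact ih.1
    refine ⟨h1, ?_⟩
    by_cases hc : ch ∈ pvCLS
    · simpa [pvTokB, pvTokA, hc] using ih.1
    · have h1' := h1
      simp only [pvTokB] at h1'
      simp [pvTokB, pvTokA, hc]
      exact h1'

-- sep-'' join is flatten
theorem pvJoin_nil_flatten (l : List (List Char)) :
    PySem.Chars.join [] l = l.flatten := by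
  induction l with
  | nil => rfl
  | cons x r ih =>
    cases r with
    | nil => simp [PySem.Chars.join, List.intercalate]
    | cons y s => simpa [PySem.Chars.join_cons_cons] using ih

-- the prefix list B builds
def pvPrefixes (p : List Char) : List (List Char) → List (List Char)
  | [] => []
  | t :: r => (p ++ t) :: pvPrefixes (p ++ t) r

theorem pvFoldB (ts : List (List Char)) (p : List Char) (acc : List String) :
    (ts.foldl
        (fun (st : List Char × List String) tok =>
          (st.1 ++ tok, st.2 ++ [String.ofList (st.1 ++ tok)]))
        (p, acc)).2 = acc ++ (pvPrefixes p ts).map String.ofList := by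
  induction ts generalizing p acc with
  | nil => simp [pvPrefixes]
  | cons t r ih =>
    rw [List.foldl_cons, ih (p ++ t) (acc ++ [String.ofList (p ++ t)])]
    simp [pvPrefixes]

theorem pvPrefixes_eq (ts : List (List Char)) (p : List Char) :
    pvPrefixes p ts = (List.range ts.length).map (fun k => p ++ (ts.take (k + 1)).flatten) := by
  induction ts generalizing p with
  | nil => simp [pvPrefixes]
  | cons t r ih =>
    simp only [pvPrefixes, List.length_cons, List.range_succ_eq_map, List.map_cons, List.map_map]
    refine congrArg₂ _ (by simp) ?_
    rw [ih (p ++ t)]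
    refine List.map_congr_left fun k _ => ?_
    simp [List.append_assoc]

-- common form of both emission loops, for a natural bound n ≤ |ts|
theorem pvCommon (ts : List (List Char)) (n : Nat) (hn : n ≤ ts.length) :
    (PySem.List.pyRange 1 ((n : Int) + 1) 1).foldl
        (fun masks length =>
          masks ++ [String.ofList (PySem.Chars.join [] (PySem.List.slice ts none (some length)))])
        []
      = ((PySem.List.slice ts none (some (n : Int))).foldl
          (fun (st : List Char × List String) tok =>
            (st.1 ++ tok, st.2 ++ [String.ofList (st.1 ++ tok)]))
          ([], [])).2 := by
  rw [PySem.List.slice_to_natCast, pvFoldB, pvPrefixes_eq]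
  have hl : (ts.take n).length = n := by simp [hn]
  rw [PySem.List.foldl_append_singleton_eq_map, PySem.List.pyRange_one]
  have hcast : ((n : Int) + 1 - 1).toNat = n := by omega
  rw [hcast, hl]
  simp only [List.map_map, List.nil_append]
  refine List.map_congr_left fun k hk => ?_
  have hk' : k < n := List.mem_range.mp hk
  simp only [Function.comp_apply]
  have h1 : ((1 : Int) + k) = ((k + 1 : Nat) : Int) := by push_cast; ring
  rw [h1, PySem.List.slice_to_natCast, pvJoin_nil_flatten, List.take_take]
  have h2 : min (k + 1) n = k + 1 := by omega
  rw [h2]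

-- ===== VERDICT (by name: the statement is the Claim_ definition above) =====
theorem expand_mask_incrementally_spec : Claim_equal_expand_mask_incrementally := by
  intro mask max_length _
  unfold Spec_expand_mask_incrementally expand_mask_incrementally expand_mask_incrementally_alt
  rw [(pvTok_both mask.toList).1]
  by_cases h : mask.toList = []
  · simp [h, pvTokA, PySem.List.slice]
  · simp only [h, if_false]
    set ts := pvTokA mask.toList with hts
    cases max_length with
    | none =>
      exact pvCommon ts ts.length le_rfl
    | some m =>
      show (PySem.List.pyRange 1 (min m (ts.length : Int) + 1) 1).foldl
          (fun masks length =>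
            masks ++ [String.ofList (PySem.Chars.join [] (PySem.List.slice ts none (some length)))])
          []
        = ((PySem.List.slice ts none (some (max 0 (min m (ts.length : Int))))).foldl
            (fun (st : List Char × List String) tok =>
              (st.1 ++ tok, st.2 ++ [String.ofList (st.1 ++ tok)]))
            ([], [])).2
      by_cases hm : m < 0
      · have h1 : min m (ts.length : Int) + 1 ≤ 1 := by omega
        rw [PySem.List.pyRange_one_eq_nil h1]
        have h2 : max 0 (min m (ts.length : Int)) = (0 : Int) := by omega
        rw [h2]
        simp [PySem.List.slice_to]
      · rw [not_lt] at hm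
        have h0 : (0 : Int) ≤ min m (ts.length : Int) := by omega
        have h2 : max 0 (min m (ts.length : Int)) = min m (ts.length : Int) := by omega
        rw [h2]
        have hk : (min m (ts.length : Int)).toNat ≤ ts.length := by omega
        have hcast : min m (ts.length : Int) = (((min m (ts.length : Int)).toNat : Nat) : Int) := by
          omega
        rw [hcast]
        exact pvCommon ts (min m (ts.length : Int)).toNat hk
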